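-- pv_equiv track=rewrite | github.com/mann-WOO/SWEA | 10587_List2_연습2/sol1.py | bitsum
-- ===== SOURCE A (Python) =====
-- def bitsum(arr):
--     # 1부터 시작해 공집합인 경우를 제외
--     for i in range(1, 1 << 10):
--         # 각 부분집합의 합을 tmp에 합산, 하나의 부분집합에서 합산이 끝나면 합을 확인
--         tmp = 0
--         for j in range(10):
--             if i & (1 << j):
--                 tmp += arr[j]
--         # 합산 후 tmp가 0이 된다면 1을 return
--         if tmp == 0:
--             return 1
--     # 모든 부분집합에서 tmp가 0이 되지 않는다면 0을 return
--     return 0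
-- ===== SOURCE B (Python) =====
-- def bitsum(arr):
--     # Subset-sum reachability DP over the first 10 elements (same arr[j]
--     # indexing as the original, so short arrays still raise IndexError).
--     sums = set()
--     for j in range(10):
--         x = arr[j]
--         sums = sums | {x} | {s + x for s in sums}
--         if 0 in sums:
--             return 1
--     return 0
-- ===== Notes on version B (the rewrite author's own statement) =====
-- stated objective: alternative
-- what changed: Replaces the enumeration of all 1023 bitmasks (each re-summing selected elements) by a single pass over the first 10 elements that accumulates the set of all reachable nonempty-subset sums and stops when 0 becomes reachable.
import Mathlib
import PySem

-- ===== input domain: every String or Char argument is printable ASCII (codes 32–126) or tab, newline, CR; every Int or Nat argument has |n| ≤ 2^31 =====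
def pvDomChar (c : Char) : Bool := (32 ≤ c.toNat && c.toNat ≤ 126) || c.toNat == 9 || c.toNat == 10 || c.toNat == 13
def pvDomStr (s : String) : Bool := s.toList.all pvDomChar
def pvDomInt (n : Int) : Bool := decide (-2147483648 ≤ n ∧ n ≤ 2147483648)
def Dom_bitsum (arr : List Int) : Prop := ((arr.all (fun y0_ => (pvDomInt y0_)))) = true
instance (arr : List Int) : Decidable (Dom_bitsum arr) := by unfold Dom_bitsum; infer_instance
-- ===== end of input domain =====

-- B replaces A's 2^10 bitmask enumeration by a single subset-sum reachability pass
-- (a growing set of reachable nonempty-subset sums); objective: alternative/simpler.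

-- ===== PORT A =====
-- inner loop 'tmp = 0; for j in range(10): if i & (1 << j): tmp += arr[j]'
-- (the loop counters i, j are nonnegative Python ints, kept as Nat)
def maskSum (arr : List Int) (i : Nat) : List Nat → Int → Option Int
  | [], tmp => some tmp
  | j :: js, tmp =>
    if i &&& (1 <<< j) ≠ 0 then
      match PySem.List.pyGet? arr (j : Int) with
      | none => none
      | some v => maskSum arr i js (tmp + v)
    else maskSum arr i js tmp

-- outer loop 'for i in range(1, 1 << 10): … if tmp == 0: return 1' then 'return 0'
def outerLoop (arr : List Int) : List Nat → Option Int
  | [] => some 0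
  | i :: rest =>
    match maskSum arr i (List.range 10) 0 with
    | none => none
    | some tmp => if tmp = 0 then some 1 else outerLoop arr rest

def bitsum (arr : List Int) : Int := (outerLoop arr (List.range' 1 1023)).getD 0

-- ===== PORT B =====
-- 'sums = sums | {x} | {s + x for s in sums}'
def bStep (sums : PySem.Set Int) (x : Int) : PySem.Set Int :=
  PySem.Set.union (PySem.Set.union sums [x]) (sums.map (fun s => s + x))

-- 'for j in range(10): x = arr[j]; …; if 0 in sums: return 1' then 'return 0'
def bLoop (arr : List Int) : List Nat → PySem.Set Int → Option Int
  | [], _ => some 0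
  | j :: js, sums =>
    match PySem.List.pyGet? arr (j : Int) with
    | none => none
    | some x =>
      let sums' := bStep sums x
      if (0 : Int) ∈ sums' then some 1 else bLoop arr js sums'

def bitsum_alt (arr : List Int) : Int := (bLoop arr (List.range 10) PySem.Set.empty).getD 0

-- ===== PRECONDITION & SPEC =====
-- Pre_ excludes exactly the inputs where Python A raises IndexError: fewer than 10
-- elements and no nonempty zero-sum subset among them (B raises IndexError there too).
def Pre_bitsum (arr : List Int) : Prop :=
  10 ≤ arr.length ∨ ∃ sub ∈ (arr.take 9).sublists, sub ≠ [] ∧ sub.sum = 0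
instance (arr : List Int) : Decidable (Pre_bitsum arr) := by unfold Pre_bitsum; infer_instance

def pvWitness_bitsum : List Int := [1, 2, 3, 4, 5, 6, 7, 8, 9, 10]

def Spec_bitsum (arr : List Int) (out : Int) : Prop := out = bitsum_alt arr
instance (arr : List Int) (out : Int) : Decidable (Spec_bitsum arr out) := by unfold Spec_bitsum; infer_instance

-- ===== CLAIM (what is proved, stated in full; the proofs are below) =====
def Claim_equal_bitsum : Prop := ∀ (arr : List Int), Dom_bitsum arr → Pre_bitsum arr → Spec_bitsum arr (bitsum arr)

-- ===== LEMMAS AND PROOFS =====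

-- 's is the sum of some nonempty subset (sublist) of l'
def subSums (l : List Int) (s : Int) : Prop :=
  ∃ sub, List.Sublist sub l ∧ sub ≠ [] ∧ sub.sum = s

-- the sublist of l selected by the bits of i (bit 0 ↔ head)
def pick : List Int → Nat → List Int
  | [], _ => []
  | x :: t, i => (if i % 2 = 1 then [x] else []) ++ pick t (i / 2)

lemma pick_zero (l : List Int) : pick l 0 = [] := by
  induction l with
  | nil => rfl
  | cons x t ih => simp [pick, ih]

lemma pick_sublist (l : List Int) (i : Nat) : List.Sublist (pick l i) l := by
  induction l generalizing i with
  | nil => simp [pick]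
  | cons x t ih =>
    by_cases h : i % 2 = 1
    · simpa [pick, h] using List.Sublist.cons₂ x (ih (i / 2))
    · simpa [pick, h] using List.Sublist.cons x (ih (i / 2))

lemma pick_surj {sub l : List Int} (h : List.Sublist sub l) :
    ∃ i, i < 2 ^ l.length ∧ pick l i = sub := by
  induction h with
  | slnil => exact ⟨0, by simp [pick]⟩
  | @cons l₁ l₂ a h ih =>
    obtain ⟨i, hi, hp⟩ := ih
    refine ⟨2 * i, by simp only [List.length_cons, pow_succ]; omega, ?_⟩
    have hm : ¬ ((2 * i) % 2 = 1) := by omega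
    have hd : (2 * i) / 2 = i := by omega
    simp [pick, hd, hp]
  | @cons₂ l₁ l₂ a h ih =>
    obtain ⟨i, hi, hp⟩ := ih
    refine ⟨2 * i + 1, by simp only [List.length_cons, pow_succ]; omega, ?_⟩
    have hm : (2 * i + 1) % 2 = 1 := by omega
    have hd : (2 * i + 1) / 2 = i := by omega
    simp [pick, hm, hd, hp]

lemma pick_ne_nil {l : List Int} {i : Nat} (h0 : 0 < i) (h : i < 2 ^ l.length) :
    pick l i ≠ [] := by
  induction l generalizing i with
  | nil => simp at h; omega
  | cons x t ih =>
    by_cases hm : i % 2 = 1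
    · simp [pick, hm]
    · have h1 : 0 < i / 2 := by omega
      have h2 : i / 2 < 2 ^ t.length := by
        simp [pow_succ] at h; omega
      simpa [pick, hm] using ih h1 h2

lemma testBit_lt_of_lt_pow {i j L : Nat} (h : i < 2 ^ L) (hb : i.testBit j = true) : j < L := by
  by_contra hj
  have : i < 2 ^ j := lt_of_lt_of_le h (Nat.pow_le_pow_right (by norm_num) (by omega))
  simp [Nat.testBit_lt_two_pow this] at hb

lemma maskSum_ok : ∀ (m k : Nat) (arr : List Int) (i : Nat) (tmp : Int),
    (∀ j, k ≤ j → j < k + m → i.testBit j = true → j < arr.length) →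
    maskSum arr i (List.range' k m) tmp =
      some (tmp + (pick ((arr.drop k).take m) (i >>> k)).sum) := by
  intro m
  induction m with
  | zero => intro k arr i tmp _; simp [maskSum, pick]
  | succ m ih =>
    intro k arr i tmp H
    have hrange : List.range' k (m + 1) = k :: List.range' (k + 1) m := by
      simpa using List.range'_succ (s := k) (n := m) (step := 1)
    rw [hrange]
    have hbit : (i &&& (1 <<< k) ≠ 0) ↔ i.testBit k = true := by
      simp [Nat.one_shiftLeft, Nat.and_two_pow]
    have hdiv : i >>> k / 2 = i >>> (k + 1) := (Nat.shiftRight_succ i k).symm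
    have hmod : (i >>> k) % 2 = 1 ↔ i.testBit k = true := by
      rw [Nat.shiftRight_eq_div_pow]
      simp [Nat.testBit_eq_decide_div_mod_eq]
    by_cases hb : i.testBit k = true
    · have hk : k < arr.length := H k le_rfl (by omega) hb
      simp only [maskSum, if_pos (hbit.mpr hb), PySem.List.pyGet?_natCast,
        List.getElem?_eq_getElem hk]
      rw [ih (k + 1) arr i (tmp + arr[k]) (fun j h1 h2 h3 => H j (by omega) (by omega) h3)]
      rw [List.drop_eq_getElem_cons hk, List.take_succ_cons]
      simp only [pick, if_pos (hmod.mpr hb), hdiv]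
      simp [add_assoc]
    · simp only [maskSum, if_neg (fun hc => hb (hbit.mp hc))]
      rw [ih (k + 1) arr i tmp (fun j h1 h2 h3 => H j (by omega) (by omega) h3)]
      by_cases hk : k < arr.length
      · rw [List.drop_eq_getElem_cons hk, List.take_succ_cons]
        have hm0 : ¬ ((i >>> k) % 2 = 1) := fun hc => hb (hmod.mp hc)
        simp [pick, hm0, hdiv]
      · have d1 : arr.drop k = [] := List.drop_eq_nil_of_le (by omega)
        have d2 : arr.drop (k + 1) = [] := List.drop_eq_nil_of_le (by omega)
        simp [d1, d2, pick]

lemma outer_one : ∀ (pre : List Nat) (i0 : Nat) (post : List Nat) (arr : List Int),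
    (∀ i ∈ pre, ∃ v, maskSum arr i (List.range 10) 0 = some v) →
    maskSum arr i0 (List.range 10) 0 = some 0 →
    outerLoop arr (pre ++ i0 :: post) = some 1 := by
  intro pre
  induction pre with
  | nil => intro i0 post arr _ h0; simp [outerLoop, h0]
  | cons a pre ih =>
    intro i0 post arr H h0
    obtain ⟨v, hv⟩ := H a (by simp)
    by_cases hz : v = 0
    · simp [outerLoop, hv, hz]
    · simp only [List.cons_append, outerLoop, hv, if_neg hz]
      exact ih i0 post arr (fun i hi => H i (by simp [hi])) h0

lemma outer_zero : ∀ (masks : List Nat) (arr : List Int),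
    (∀ i ∈ masks, ∃ v, maskSum arr i (List.range 10) 0 = some v ∧ v ≠ 0) →
    outerLoop arr masks = some 0 := by
  intro masks
  induction masks with
  | nil => intro arr _; rfl
  | cons a rest ih =>
    intro arr H
    obtain ⟨v, hv, hvz⟩ := H a (by simp)
    simp only [outerLoop, hv, if_neg hvz]
    exact ih arr (fun i hi => H i (by simp [hi]))

lemma subSums_concat {L : List Int} {x s : Int} :
    subSums (L ++ [x]) s ↔ (subSums L s ∨ s = x ∨ ∃ t, subSums L t ∧ s = t + x) := by
  constructor
  · rintro ⟨sub, hsub, hne, hsum⟩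
    rw [List.sublist_append_iff] at hsub
    obtain ⟨l₁, l₂, rfl, h1, h2⟩ := hsub
    rcases List.sublist_singleton.mp h2 with rfl | rfl
    · exact Or.inl ⟨l₁, h1, by simpa using hne, by simpa using hsum⟩
    · cases l₁ with
      | nil => right; left; simpa using hsum.symm
      | cons y ys =>
        right; right
        refine ⟨(y :: ys).sum, ⟨y :: ys, h1, by simp, rfl⟩, ?_⟩
        simp only [List.sum_append, List.sum_cons, List.sum_nil, add_zero] at hsum ⊢
        omega
  · rintro (⟨sub, h, hne, hs⟩ | rfl | ⟨t, ⟨u, hu, hne, ht⟩, rfl⟩)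
    · exact ⟨sub, h.trans (List.sublist_append_left L [x]), hne, hs⟩
    · exact ⟨[s], List.sublist_append_right L [s], by simp, by simp⟩
    · exact ⟨u ++ [x], hu.append (List.Sublist.refl [x]), by simp, by simp [ht]⟩

lemma mem_bStep {sums : PySem.Set Int} {x y : Int} :
    y ∈ bStep sums x ↔ (y ∈ sums ∨ y = x ∨ ∃ t ∈ sums, y = t + x) := by
  simp only [bStep, PySem.Set.mem_union, List.mem_map, List.mem_singleton]
  constructor
  · rintro ((h | h) | ⟨t, ht, rfl⟩)
    · exact Or.inl h
    · exact Or.inr (Or.inl h)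
    · exact Or.inr (Or.inr ⟨t, ht, rfl⟩)
  · rintro (h | h | ⟨t, ht, rfl⟩)
    · exact Or.inl (Or.inl h)
    · exact Or.inl (Or.inr h)
    · exact Or.inr ⟨t, ht, rfl⟩

lemma inv_step {arr : List Int} {k : Nat} {sums : PySem.Set Int} (hk : k < arr.length)
    (hinv : ∀ s, s ∈ sums ↔ subSums (arr.take k) s) :
    ∀ s, s ∈ bStep sums arr[k] ↔ subSums (arr.take (k + 1)) s := by
  intro s
  have htake : arr.take (k + 1) = arr.take k ++ [arr[k]] := by
    rw [List.take_add_one, List.getElem?_eq_getElem hk]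
    rfl
  rw [htake, subSums_concat, mem_bStep]
  constructor
  · rintro (h | h | ⟨t, ht, rfl⟩)
    · exact Or.inl ((hinv s).mp h)
    · exact Or.inr (Or.inl h)
    · exact Or.inr (Or.inr ⟨t, (hinv t).mp ht, rfl⟩)
  · rintro (h | h | ⟨t, ht, rfl⟩)
    · exact Or.inl ((hinv s).mpr h)
    · exact Or.inr (Or.inl h)
    · exact Or.inr (Or.inr ⟨t, (hinv t).mpr ht, rfl⟩)

lemma subSums_mono {l₁ l₂ : List Int} {s : Int} (h : List.Sublist l₁ l₂) :
    subSums l₁ s → subSums l₂ s := by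
  rintro ⟨sub, hsub, hne, hsum⟩
  exact ⟨sub, hsub.trans h, hne, hsum⟩

lemma take_sublist_take (arr : List Int) {a b : Nat} (h : a ≤ b) :
    List.Sublist (arr.take a) (arr.take b) := by
  have : arr.take a = (arr.take b).take a := by
    rw [List.take_take, Nat.min_eq_left h]
  rw [this]
  exact List.take_sublist a (arr.take b)

lemma inv_empty (arr : List Int) : ∀ s : Int, s ∈ (PySem.Set.empty : PySem.Set Int) ↔ subSums (arr.take 0) s := by
  intro s
  constructor
  · intro h; exact absurd h (List.not_mem_nil)
  · rintro ⟨sub, hsub, hne, _⟩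
    simp at hsub
    exact absurd hsub hne

lemma B_one : ∀ (m k : Nat) (arr : List Int) (sums : PySem.Set Int), k + m = 10 →
    k ≤ arr.length → (∀ s, s ∈ sums ↔ subSums (arr.take k) s) → (0 : Int) ∉ sums →
    subSums (arr.take 10) 0 → bLoop arr (List.range' k m) sums = some 1 := by
  intro m
  induction m with
  | zero =>
    intro k arr sums hk _ hinv h0 hz
    exact absurd ((hinv 0).mpr (by rwa [show k = 10 from by omega])) h0
  | succ m ih =>
    intro k arr sums hk hkl hinv h0 hz
    have hklt : k < arr.length := by
      rcases Nat.lt_or_ge k arr.length with h | h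
      · exact h
      · exfalso
        have hlen : arr.length = k := by omega
        have ha : arr.take 10 = arr := List.take_of_length_le (by omega)
        have hb : arr.take k = arr := List.take_of_length_le (by omega)
        rw [ha] at hz
        rw [hb] at hinv
        exact h0 ((hinv 0).mpr hz)
    have hrange : List.range' k (m + 1) = k :: List.range' (k + 1) m := by
      simpa using List.range'_succ (s := k) (n := m) (step := 1)
    rw [hrange]
    simp only [bLoop, PySem.List.pyGet?_natCast, List.getElem?_eq_getElem hklt]
    by_cases h0' : (0 : Int) ∈ bStep sums (arr[k]'hklt)
    · simp [h0']
    · simp only [if_neg h0']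
      exact ih (k + 1) arr _ (by omega) hklt (inv_step hklt hinv) h0' hz

lemma B_zero : ∀ (m k : Nat) (arr : List Int) (sums : PySem.Set Int), k + m = 10 →
    10 ≤ arr.length → (∀ s, s ∈ sums ↔ subSums (arr.take k) s) →
    ¬ subSums (arr.take 10) 0 → bLoop arr (List.range' k m) sums = some 0 := by
  intro m
  induction m with
  | zero => intro k arr sums _ _ _ _; rfl
  | succ m ih =>
    intro k arr sums hk hlen hinv hz
    have hklt : k < arr.length := by omega
    have hrange : List.range' k (m + 1) = k :: List.range' (k + 1) m := by
      simpa using List.range'_succ (s := k) (n := m) (step := 1)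
    rw [hrange]
    simp only [bLoop, PySem.List.pyGet?_natCast, List.getElem?_eq_getElem hklt]
    have h0' : (0 : Int) ∉ bStep sums (arr[k]'hklt) := by
      intro hc
      exact hz (subSums_mono (take_sublist_take arr (by omega))
        ((inv_step hklt hinv 0).mp hc))
    simp only [if_neg h0']
    exact ih (k + 1) arr _ (by omega) hlen (inv_step hklt hinv) hz

lemma range_ten : List.range 10 = List.range' 0 10 := List.range_eq_range'

-- ===== VERDICT (by name: the statement is the Claim_ definition above) =====
theorem bitsum_spec : Claim_equal_bitsum := by
  intro arr _hdom hpre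
  unfold Spec_bitsum bitsum bitsum_alt
  by_cases hz : subSums (arr.take 10) 0
  · -- both return 1
    obtain ⟨sub, hsub, hne, hsum⟩ := hz
    obtain ⟨i, hi, hpick⟩ := pick_surj hsub
    have hiz : 0 < i := by
      rcases Nat.eq_zero_or_pos i with rfl | h
      · rw [pick_zero] at hpick; exact absurd hpick.symm hne
      · exact h
    have hlenle : (arr.take 10).length ≤ 10 := by
      simp [List.length_take]
    have hi1024 : i < 1024 := lt_of_lt_of_le hi
      (le_trans (Nat.pow_le_pow_right (by norm_num) hlenle) (by norm_num))
    have hcond : ∀ i', i' < 2 ^ (arr.take 10).length →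
        ∀ j, 0 ≤ j → j < 0 + 10 → i'.testBit j = true → j < arr.length := by
      intro i' hi' j _ _ hb
      have hj := testBit_lt_of_lt_pow hi' hb
      simp [List.length_take] at hj
      omega
    have hsplit : List.range' 1 1023 = List.range' 1 (i - 1) ++ i :: List.range' (i + 1) (1023 - i) := by
      have h1 : List.range' i (1024 - i) = i :: List.range' (i + 1) (1023 - i) := by
        rw [show 1024 - i = (1023 - i) + 1 from by omega]
        simpa using List.range'_succ (s := i) (n := 1023 - i) (step := 1)
      calc List.range' 1 1023 = List.range' 1 ((i - 1) + (1024 - i)) := by congr 1; omega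
        _ = List.range' 1 (i - 1) ++ List.range' (1 + (i - 1)) (1024 - i) := by
            rw [← List.range'_append_1 (s := 1) (m := i - 1) (n := 1024 - i)]
        _ = List.range' 1 (i - 1) ++ i :: List.range' (i + 1) (1023 - i) := by
            rw [show 1 + (i - 1) = i from by omega, h1]
    have hAsome : outerLoop arr (List.range' 1 1023) = some 1 := by
      rw [hsplit]
      apply outer_one
      · intro i' hmem
        obtain ⟨h1, h2⟩ := List.mem_range'_1.mp hmem
        refine ⟨0 + (pick ((arr.drop 0).take 10) (i' >>> 0)).sum, ?_⟩
        rw [range_ten]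
        exact maskSum_ok 10 0 arr i' 0 (hcond i' (by omega))
      · rw [range_ten, maskSum_ok 10 0 arr i 0 (hcond i hi)]
        simp [hpick, hsum]
    have hBsome : bLoop arr (List.range 10) PySem.Set.empty = some 1 := by
      rw [range_ten]
      exact B_one 10 0 arr PySem.Set.empty rfl (Nat.zero_le _) (inv_empty arr)
        (List.not_mem_nil) ⟨sub, hsub, hne, hsum⟩
    rw [hAsome, hBsome]
  · -- both return 0
    have hlen : 10 ≤ arr.length := by
      rcases hpre with h | ⟨sub, hmem, hne, hsum⟩
      · exact h
      · exact absurd (subSums_mono (take_sublist_take arr (by omega : 9 ≤ 10))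
          ⟨sub, List.mem_sublists.mp hmem, hne, hsum⟩) hz
    have hlt : (arr.take 10).length = 10 := by simp [List.length_take]; omega
    have hAsome : outerLoop arr (List.range' 1 1023) = some 0 := by
      apply outer_zero
      intro i hmem
      obtain ⟨h1, h2⟩ := List.mem_range'_1.mp hmem
      refine ⟨0 + (pick ((arr.drop 0).take 10) (i >>> 0)).sum, ?_, ?_⟩
      · rw [range_ten]
        exact maskSum_ok 10 0 arr i 0 (fun j _ hj _ => by omega)
      intro hc
      simp at hc
      exact hz ⟨pick (arr.take 10) i, pick_sublist _ _,
        pick_ne_nil h1 (by rw [hlt]; norm_num; omega), hc⟩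
    have hBsome : bLoop arr (List.range 10) PySem.Set.empty = some 0 := by
      rw [range_ten]
      exact B_zero 10 0 arr PySem.Set.empty rfl hlen (inv_empty arr) hz
    rw [hAsome, hBsome]
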